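-- pv_equiv track=rewrite | github.com/rubybui/seatmap-testing | src/seat-nhqd-gen.py | generate_numbers
-- ===== SOURCE A (Python) =====
-- def generate_numbers(parity, start, end, direction):
--     """
--     Builds a list of seat numbers from `start`..`end` (inclusive),
--     filtered by parity ('odd', 'even', or 'all'),
--     then sorted ascending or descending.
--     """
--     low, high = (min(start, end), max(start, end))
--     all_nums = range(low, high + 1)
--
--     if parity == "odd":
--         nums = [n for n in all_nums if n % 2 == 1]
--     elif parity == "even":
--         nums = [n for n in all_nums if n % 2 == 0]
--     else:  # 'all'
--         nums = list(all_nums)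
--
--     if direction == "asc":
--         nums.sort()
--     else:  # 'desc'
--         nums.sort(reverse=True)
--
--     return nums
-- ===== SOURCE B (Python) =====
-- def generate_numbers(parity, start, end, direction):
--     """Arithmetic endpoints + stepped range: no filtering, no sort."""
--     low, high = (start, end) if start <= end else (end, start)
--     if parity == "odd":
--         first, step = (low if low % 2 == 1 else low + 1), 2
--     elif parity == "even":
--         first, step = (low if low % 2 == 0 else low + 1), 2
--     else:
--         first, step = low, 1
--     asc = list(range(first, high + 1, step))
--     return asc if direction == "asc" else asc[::-1]
-- ===== Notes on version B (the rewrite author's own statement) =====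
-- stated objective: idiomatic
-- what changed: Replaces the filter-over-full-range plus sort with arithmetically computed first element and step, building the already-ordered stepped range directly and reversing it for 'desc'.
import Mathlib
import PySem

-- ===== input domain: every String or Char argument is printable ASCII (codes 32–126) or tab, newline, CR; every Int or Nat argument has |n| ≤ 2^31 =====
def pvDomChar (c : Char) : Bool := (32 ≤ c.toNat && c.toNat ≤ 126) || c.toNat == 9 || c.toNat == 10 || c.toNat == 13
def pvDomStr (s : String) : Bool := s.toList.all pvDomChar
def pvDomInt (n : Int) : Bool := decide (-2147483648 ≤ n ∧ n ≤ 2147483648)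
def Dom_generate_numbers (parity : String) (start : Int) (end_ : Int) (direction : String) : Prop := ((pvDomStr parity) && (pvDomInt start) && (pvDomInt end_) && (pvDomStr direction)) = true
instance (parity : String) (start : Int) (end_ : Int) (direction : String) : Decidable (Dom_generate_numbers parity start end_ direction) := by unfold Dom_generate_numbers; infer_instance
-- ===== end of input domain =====

-- B computes the parity-adjusted first element and step arithmetically and emits the
-- stepped range directly (reversed for 'desc'), instead of filtering the full range and sorting.


-- ===== PORT A =====
def generate_numbers (parity : String) (start : Int) (end_ : Int) (direction : String) : List Int :=
  let low := min start end_
  let high := max start end_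
  let all_nums := PySem.List.pyRange low (high + 1) 1
  let nums :=
    if parity == "odd" then all_nums.filter (fun n => PySem.Int.mod n 2 == 1)
    else if parity == "even" then all_nums.filter (fun n => PySem.Int.mod n 2 == 0)
    else all_nums
  if direction == "asc" then PySem.List.sorted nums (fun x => x)
  else PySem.List.sorted nums (fun x => x) true

-- ===== PORT B =====
def generate_numbers_alt (parity : String) (start : Int) (end_ : Int) (direction : String) : List Int :=
  let low := if start ≤ end_ then start else end_
  let high := if start ≤ end_ then end_ else start
  let fs : Int × Int :=
    if parity == "odd" then ((if PySem.Int.mod low 2 == 1 then low else low + 1), 2)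
    else if parity == "even" then ((if PySem.Int.mod low 2 == 0 then low else low + 1), 2)
    else (low, 1)
  let asc := PySem.List.pyRange fs.1 (high + 1) fs.2
  if direction == "asc" then asc else asc.reverse

-- ===== PRECONDITION & SPEC =====
def Spec_generate_numbers (parity : String) (start : Int) (end_ : Int) (direction : String) (out : List Int) : Prop := out = generate_numbers_alt parity start end_ direction
instance (parity : String) (start : Int) (end_ : Int) (direction : String) (out : List Int) : Decidable (Spec_generate_numbers parity start end_ direction out) := by unfold Spec_generate_numbers; infer_instance

-- ===== CLAIM (what is proved, stated in full; the proofs are below) =====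
def Claim_equal_generate_numbers : Prop := ∀ (parity : String) (start : Int) (end_ : Int) (direction : String), Dom_generate_numbers parity start end_ direction → Spec_generate_numbers parity start end_ direction (generate_numbers parity start end_ direction)

-- ===== LEMMAS AND PROOFS =====

lemma pyRange_two_nil (a b : Int) (h : b ≤ a) : PySem.List.pyRange a b 2 = [] := by
  rw [PySem.List.pyRange_of_pos _ _ (by norm_num : (0:Int) < 2)]
  rw [if_neg (by omega)]
  simp

lemma pyRange_two_cons (a b : Int) (h : a < b) :
    PySem.List.pyRange a b 2 = a :: PySem.List.pyRange (a + 2) b 2 := by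
  rw [PySem.List.pyRange_of_pos _ _ (by norm_num : (0:Int) < 2),
      PySem.List.pyRange_of_pos _ _ (by norm_num : (0:Int) < 2)]
  have h2 : (if a < b then ((b - a + 2 - 1) / 2).toNat else 0)
      = (if a + 2 < b then ((b - (a + 2) + 2 - 1) / 2).toNat else 0) + 1 := by
    split_ifs <;> omega
  rw [h2, List.range_succ_eq_map, List.map_cons, List.map_map]
  simp only [Nat.cast_zero, mul_zero, add_zero]
  congr 1
  apply List.map_congr_left
  intro k _
  simp only [Function.comp_apply]
  push_cast
  ring

-- filter-by-parity of a unit range is a stepped range starting at the first matching value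
lemma filter_pyRange_parity (r : Int) (hr : r = 0 ∨ r = 1) (n : Nat) :
    ∀ a b : Int, (b - a).toNat = n →
    (PySem.List.pyRange a b 1).filter (fun x => PySem.Int.mod x 2 == r)
      = PySem.List.pyRange (if PySem.Int.mod a 2 == r then a else a + 1) b 2 := by
  induction n with
  | zero =>
    intro a b hab
    rw [PySem.List.pyRange_one_eq_nil (by omega)]
    rw [pyRange_two_nil _ _ (by split_ifs <;> omega)]
    simp
  | succ n ih =>
    intro a b hab
    have hlt : a < b := by omega
    have hma : PySem.Int.mod a 2 = a % 2 := PySem.Int.mod_eq_emod_of_pos (by norm_num)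
    have hma1 : PySem.Int.mod (a + 1) 2 = (a + 1) % 2 := PySem.Int.mod_eq_emod_of_pos (by norm_num)
    rw [PySem.List.pyRange_one_cons hlt, List.filter_cons]
    by_cases hc : PySem.Int.mod a 2 = r
    · have hnc : ¬ PySem.Int.mod (a + 1) 2 = r := by rw [hma1]; rw [hma] at hc; omega
      have hthis := ih (a + 1) b (by omega)
      rw [if_neg (by simpa using hnc)] at hthis
      rw [if_pos (by simpa using hc), if_pos (by simpa using hc), hthis,
          show a + 1 + 1 = a + 2 by ring, ← pyRange_two_cons a b hlt]
    · have hc' : PySem.Int.mod (a + 1) 2 = r := by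
        rw [hma1]; rw [hma] at hc; rcases hr with h | h <;> omega
      have hthis := ih (a + 1) b (by omega)
      rw [if_pos (by simpa using hc')] at hthis
      rw [if_neg (by simpa using hc), if_neg (by simpa using hc)]
      exact hthis

lemma sorted_id_of_pairwise (nums : List Int) (h : nums.Pairwise (· < ·)) :
    PySem.List.sorted nums (fun x => x) = nums :=
  PySem.List.sorted_eq_self_of_pairwise _ _ (h.imp le_of_lt)

lemma sorted_rev_id_of_pairwise (nums : List Int) (h : nums.Pairwise (· < ·)) :
    PySem.List.sorted nums (fun x => x) true = nums.reverse :=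
  PySem.List.sorted_rev_eq_of_perm_of_pairwise_gt _ _ _ (List.reverse_perm nums)
    (by rw [List.pairwise_reverse]; exact h)

-- ===== VERDICT (by name: the statement is the Claim_ definition above) =====
theorem generate_numbers_spec : Claim_equal_generate_numbers := by
  intro parity start end_ direction _
  unfold Spec_generate_numbers generate_numbers generate_numbers_alt
  simp only [min_def, max_def]
  set low := if start ≤ end_ then start else end_ with hlow
  set high := if start ≤ end_ then end_ else start with hhigh
  have hodd := filter_pyRange_parity 1 (Or.inr rfl) ((high + 1) - low).toNat low (high + 1) rfl
  have heven := filter_pyRange_parity 0 (Or.inl rfl) ((high + 1) - low).toNat low (high + 1) rfl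
  have hpw := PySem.List.pairwise_lt_pyRange_one low (high + 1)
  by_cases ho : parity = "odd"
  · simp only [ho, beq_self_eq_true, if_pos]
    rw [hodd]
    by_cases hd : direction = "asc"
    · simp only [hd, beq_self_eq_true, if_pos]
      rw [← hodd]
      exact sorted_id_of_pairwise _ (hpw.filter _)
    · rw [if_neg (show ¬ ((direction == "asc") = true) by simpa using hd), if_neg (show ¬ ((direction == "asc") = true) by simpa using hd)]
      rw [← hodd]
      exact sorted_rev_id_of_pairwise _ (hpw.filter _)
  · rw [if_neg (show ¬ ((parity == "odd") = true) by simpa using ho), if_neg (show ¬ ((parity == "odd") = true) by simpa using ho)]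
    by_cases he : parity = "even"
    · simp only [he, beq_self_eq_true, if_pos]
      rw [heven]
      by_cases hd : direction = "asc"
      · simp only [hd, beq_self_eq_true, if_pos]
        rw [← heven]
        exact sorted_id_of_pairwise _ (hpw.filter _)
      · rw [if_neg (show ¬ ((direction == "asc") = true) by simpa using hd), if_neg (show ¬ ((direction == "asc") = true) by simpa using hd)]
        rw [← heven]
        exact sorted_rev_id_of_pairwise _ (hpw.filter _)
    · rw [if_neg (show ¬ ((parity == "even") = true) by simpa using he), if_neg (show ¬ ((parity == "even") = true) by simpa using he)]
      by_cases hd : direction = "asc"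
      · simp only [hd, beq_self_eq_true, if_pos]
        exact sorted_id_of_pairwise _ hpw
      · rw [if_neg (show ¬ ((direction == "asc") = true) by simpa using hd), if_neg (show ¬ ((direction == "asc") = true) by simpa using hd)]
        exact sorted_rev_id_of_pairwise _ hpw
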